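-- pv_equiv track=rewrite | github.com/danfimov/work-projects | 2879766/7.py | check
-- ===== SOURCE A (Python) =====
-- def check(string, string_index):  # передаем аргументами строку и её индекс
--     # если строка нечетная или на втором месте стоит нечетный элемент, то условие ложно
--     if string_index % 2 != 0 or string[1] % 2 != 1:
--         return False
--
--     start = string[0] % 2  # определяем, с какого элемента мы стартуем - с четного или нет
--     for i in range(len(string)):
--         if string[i] % 2 != start:  # сравниваем четность текущего элемента с тем, что должно быть
--             return False
--         # на каждом шаге цикла меняем четность проверочной переменной, ведь нам нужно чередование
--         start = (start + 1) % 2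
--     return True  # если условия выхода не соблюлись, значит строка соответствует условиям
-- ===== SOURCE B (Python) =====
-- def check(string, string_index):
--     if string_index % 2 != 0 or string[1] % 2 != 1:
--         return False
--     # Given string[1] is odd, the alternating condition holds exactly when
--     # every even-indexed element is even and every odd-indexed element is odd.
--     return all(x % 2 == 0 for x in string[0::2]) and all(x % 2 == 1 for x in string[1::2])
-- ===== Notes on version B (the rewrite author's own statement) =====
-- stated objective: alternative
-- what changed: A's single toggle-state pass is replaced by a closed positional characterization: since the guard forces string[1] odd, alternation holds iff all even-indexed elements are even and all odd-indexed elements are odd, checked as two stateless passes over the strided slices string[0::2] and string[1::2].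
-- outside the precondition, e.g. on check([5], 0): A raises IndexError, B raises IndexError
import Mathlib
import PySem

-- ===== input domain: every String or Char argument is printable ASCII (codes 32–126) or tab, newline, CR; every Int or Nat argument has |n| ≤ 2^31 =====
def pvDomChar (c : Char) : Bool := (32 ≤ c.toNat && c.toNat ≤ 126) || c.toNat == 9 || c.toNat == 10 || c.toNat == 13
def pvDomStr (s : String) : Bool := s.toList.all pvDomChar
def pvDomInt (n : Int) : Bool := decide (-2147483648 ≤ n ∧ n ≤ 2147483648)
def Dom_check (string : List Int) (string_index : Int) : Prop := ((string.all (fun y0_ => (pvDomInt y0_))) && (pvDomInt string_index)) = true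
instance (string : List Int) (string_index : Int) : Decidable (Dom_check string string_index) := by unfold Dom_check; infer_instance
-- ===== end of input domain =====

-- B replaces A's toggle-state loop by a closed positional characterization checked as
-- two stateless passes over the strided slices string[0::2] and string[1::2] (same cost).

-- ===== PORT A =====
-- A's loop: compare each element's parity with the toggling 'start', flipping 'start' each step.
def checkLoopA : List Int → Int → Bool
  | [], _ => true
  | x :: xs, start =>
      if PySem.Int.mod x 2 ≠ start then false
      else checkLoopA xs (PySem.Int.mod (start + 1) 2)

def check (string : List Int) (string_index : Int) : Bool :=
  if PySem.Int.mod string_index 2 ≠ 0 then false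
  else
    match PySem.List.pyGet? string 1 with
    | none => false  -- IndexError in Python; outside Pre_check
    | some s1 =>
      if PySem.Int.mod s1 2 ≠ 1 then false
      else
        match PySem.List.pyGet? string 0 with
        | none => false  -- unreachable: string[1] exists, so string[0] does
        | some s0 => checkLoopA string (PySem.Int.mod s0 2)

-- ===== PORT B =====
-- l[0::2]: PySem.List.slice has no step parameter, so the step-2 slice is ported by hand;
-- exact for a nonnegative start and step 2: elements at positions 0,2,4,… of l.
def stride2 : List Int → List Int
  | [] => []
  | [x] => [x]
  | x :: _ :: r => x :: stride2 r

def check_alt (string : List Int) (string_index : Int) : Bool :=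
  if PySem.Int.mod string_index 2 ≠ 0 then false
  else
    match PySem.List.pyGet? string 1 with
    | none => false  -- IndexError in Python; outside Pre_check
    | some s1 =>
      if PySem.Int.mod s1 2 ≠ 1 then false
      else
        (stride2 string).all (fun x => PySem.Int.mod x 2 == 0) &&
        (stride2 string.tail).all (fun x => PySem.Int.mod x 2 == 1)  -- string[1::2] = stride2 of the tail

-- ===== PRECONDITION & SPEC =====
-- Pre_ excludes exactly the inputs where both Pythons raise IndexError:
-- string_index even and len(string) < 2 (the guard then evaluates string[1]).
def Pre_check (string : List Int) (string_index : Int) : Prop :=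
  PySem.Int.mod string_index 2 = 0 → 2 ≤ string.length
instance (string : List Int) (string_index : Int) : Decidable (Pre_check string string_index) := by
  unfold Pre_check; infer_instance
def pvWitness_check : List Int × Int := ([2, 3, 4], 0)
def Spec_check (string : List Int) (string_index : Int) (out : Bool) : Prop := out = check_alt string string_index
instance (string : List Int) (string_index : Int) (out : Bool) : Decidable (Spec_check string string_index out) := by unfold Spec_check; infer_instance

-- ===== CLAIM =====
def Claim_equal_check : Prop := ∀ (string : List Int) (string_index : Int), Dom_check string string_index → Pre_check string string_index → Spec_check string string_index (check string string_index)

-- ===== LEMMAS AND PROOFS =====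
theorem pymod2 (x : Int) : PySem.Int.mod x 2 = x % 2 := by
  simp [PySem.Int.mod, Int.fmod_eq_emod]

theorem stride2_cons (y : Int) (r : List Int) : stride2 (y :: r) = y :: stride2 r.tail := by
  cases r <;> rfl

-- A's toggle loop started at parity s ∈ {0,1} checks exactly: even positions have parity s,
-- odd positions have parity 1-s.
theorem loop_eq_strides (l : List Int) (s : Int) (hs : s = 0 ∨ s = 1) :
    checkLoopA l s =
      ((stride2 l).all (fun x => x % 2 == s) &&
       (stride2 l.tail).all (fun x => x % 2 == (s + 1) % 2)) := by
  induction l using stride2.induct generalizing s with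
  | case1 => simp [checkLoopA, stride2]
  | case2 x => by_cases h : x % 2 = s <;> simp [checkLoopA, stride2, h]
  | case3 x y r ih =>
    have ih0 := ih 0 (Or.inl rfl)
    have ih1 := ih 1 (Or.inr rfl)
    rcases hs with h | h <;> subst h <;>
      simp only [checkLoopA, stride2_cons, List.tail_cons, List.all_cons, pymod2,
        show PySem.Int.mod ((0:Int) + 1) 2 = 1 from by decide,
        show PySem.Int.mod ((1:Int) + 1) 2 = 0 from by decide,
        show ((0:Int) + 1) % 2 = 1 from by decide,
        show ((1:Int) + 1) % 2 = 0 from by decide] <;>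
      [ (by_cases hx : x % 2 = 0 <;> by_cases hy : y % 2 = 1 <;>
          simp [hx, hy, ih0]);
        (by_cases hx : x % 2 = 1 <;> by_cases hy : y % 2 = 0 <;>
          simp [hx, hy, ih1]) ]

theorem check_eq_alt (string : List Int) (string_index : Int) :
    check string string_index = check_alt string string_index := by
  unfold check check_alt
  match string with
  | [] => rfl
  | [a] => rfl
  | a :: b :: rest =>
    have h1 : PySem.List.pyGet? (a :: b :: rest) 1 = some b := by
      simp [PySem.List.pyGet?, PySem.List.pyIdx?]
    have h0 : PySem.List.pyGet? (a :: b :: rest) 0 = some a :=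
      PySem.List.pyGet?_zero_cons a (b :: rest)
    rw [h1, h0]
    simp only [pymod2]
    split_ifs with hg hb
    · rfl
    · rfl
    · have hb1 : b % 2 = 1 := by omega
      have ha : a % 2 = 0 ∨ a % 2 = 1 := by omega
      rcases ha with ha | ha
      · have hL := loop_eq_strides (a :: b :: rest) 0 (Or.inl rfl)
        rw [ha, hL]
        norm_num
      · -- start odd: both sides are false (a odd at even position 0; the loop rejects odd b)
        have hL : checkLoopA (a :: b :: rest) 1 = false := by
          simp only [checkLoopA, show PySem.Int.mod ((1:Int) + 1) 2 = 0 from by decide]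
          rw [if_neg (by rw [pymod2]; omega), if_pos (by rw [pymod2]; omega)]
        rw [ha, hL]
        simp [stride2_cons, ha]

-- ===== VERDICT =====
theorem check_spec : Claim_equal_check := by
  intro string string_index _ _
  unfold Spec_check
  exact check_eq_alt string string_index
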